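-- pv_equiv track=rewrite | github.com/Tessier-Lab-UMich/PSERM_paper | ngs.py | seq_to_mut
-- ===== SOURCE A (Python) =====
-- def seq_to_mut(seq, cdr_regions, mut_pos):
-- 	mutation_str = ''
-- 	cdr_str = ''
-- 	for cdr in cdr_regions:
-- 		cdr_str += seq[cdr[0]:cdr[1]]
-- 		cdr_str += '_'
--
-- 	for i, aa in enumerate(cdr_str):
-- 		if i in mut_pos:
-- 			mutation_str += aa
--
-- 	return mutation_str
-- ===== SOURCE B (Python) =====
-- def seq_to_mut(seq, cdr_regions, mut_pos):
-- 	out = []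
-- 	pos = 0
-- 	for cdr in cdr_regions:
-- 		for ch in seq[cdr[0]:cdr[1]]:
-- 			if pos in mut_pos:
-- 				out.append(ch)
-- 			pos += 1
-- 		if pos in mut_pos:
-- 			out.append('_')
-- 		pos += 1
-- 	return ''.join(out)
-- ===== Notes on version B (the rewrite author's own statement) =====
-- stated objective: simpler
-- what changed: B walks the regions once with a running offset counter, testing each position against mut_pos as it goes, instead of materialising the concatenated cdr string and then enumerating it.
import Mathlib
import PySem

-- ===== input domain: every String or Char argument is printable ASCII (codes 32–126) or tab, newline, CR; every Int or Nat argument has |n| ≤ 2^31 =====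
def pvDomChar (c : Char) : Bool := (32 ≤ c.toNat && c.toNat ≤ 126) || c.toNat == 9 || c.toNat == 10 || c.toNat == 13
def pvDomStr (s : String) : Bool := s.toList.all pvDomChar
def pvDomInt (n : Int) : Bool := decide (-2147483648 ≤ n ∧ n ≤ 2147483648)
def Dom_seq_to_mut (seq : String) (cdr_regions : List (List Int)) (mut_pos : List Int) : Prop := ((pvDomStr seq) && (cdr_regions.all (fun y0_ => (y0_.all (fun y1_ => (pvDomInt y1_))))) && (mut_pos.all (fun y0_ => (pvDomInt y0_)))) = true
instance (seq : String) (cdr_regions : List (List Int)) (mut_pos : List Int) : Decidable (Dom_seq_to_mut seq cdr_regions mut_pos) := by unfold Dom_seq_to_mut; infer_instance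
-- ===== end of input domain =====

-- B walks the regions once with a running offset counter instead of building the
-- concatenated cdr string and enumerating it (objective: simpler, one pass, no
-- intermediate concatenated string).

-- ===== PORT A =====
-- A builds cdr_str = concat of seq[cdr[0]:cdr[1]] ++ "_" per region, then picks chars
-- whose enumerate-index is in mut_pos. The `_ => acc` arm is unreachable under
-- Pre_seq_to_mut (Python raises IndexError there).
def aBlockStep (seq : String) (acc : List Char) (cdr : List Int) : List Char :=
  match cdr with
  | a :: b :: _ => acc ++ PySem.List.slice seq.toList (some a) (some b) ++ ['_']
  | _ => acc

def aPick (mut_pos : List Int) (acc : List Char) (p : Int × Char) : List Char :=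
  if p.1 ∈ mut_pos then acc ++ [p.2] else acc

def seq_to_mut (seq : String) (cdr_regions : List (List Int)) (mut_pos : List Int) : String :=
  String.ofList ((PySem.List.enumerate (cdr_regions.foldl (aBlockStep seq) []) 0).foldl
    (aPick mut_pos) [])

-- ===== PORT B =====
-- B: running offset `st.1`, output chars `st.2`; per region fold over the slice's
-- characters, then account for the '_' separator.
def bChar (mut_pos : List Int) (st : Int × List Char) (ch : Char) : Int × List Char :=
  (st.1 + 1, if st.1 ∈ mut_pos then st.2 ++ [ch] else st.2)

def bRegionStep (seq : String) (mut_pos : List Int) (st : Int × List Char) (cdr : List Int) :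
    Int × List Char :=
  match cdr with
  | a :: b :: _ =>
    let st' := (PySem.List.slice seq.toList (some a) (some b)).foldl (bChar mut_pos) st
    (st'.1 + 1, if st'.1 ∈ mut_pos then st'.2 ++ ['_'] else st'.2)
  | _ => (st.1 + 1, if st.1 ∈ mut_pos then st.2 ++ ['_'] else st.2)

def seq_to_mut_alt (seq : String) (cdr_regions : List (List Int)) (mut_pos : List Int) : String :=
  String.ofList ((cdr_regions.foldl (bRegionStep seq mut_pos) ((0 : Int), ([] : List Char))).2)

-- ===== PRECONDITION & SPEC =====
-- Pre_ excludes regions with fewer than two entries: there Python A raises IndexError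
-- on cdr[0]/cdr[1] (and Python B likewise).
def Pre_seq_to_mut (seq : String) (cdr_regions : List (List Int)) (mut_pos : List Int) : Prop :=
  ∀ cdr ∈ cdr_regions, 2 ≤ cdr.length

instance (seq : String) (cdr_regions : List (List Int)) (mut_pos : List Int) : Decidable (Pre_seq_to_mut seq cdr_regions mut_pos) := by unfold Pre_seq_to_mut; infer_instance

def pvWitness_seq_to_mut : String × List (List Int) × List Int :=
  ("ACDEF", [[0, 2], [3, 5]], [1, 3, 5])

def Spec_seq_to_mut (seq : String) (cdr_regions : List (List Int)) (mut_pos : List Int) (out : String) : Prop := out = seq_to_mut_alt seq cdr_regions mut_pos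
instance (seq : String) (cdr_regions : List (List Int)) (mut_pos : List Int) (out : String) : Decidable (Spec_seq_to_mut seq cdr_regions mut_pos out) := by unfold Spec_seq_to_mut; infer_instance

-- ===== CLAIM (what is proved, stated in full; the proofs are below) =====
def Claim_equal_seq_to_mut : Prop := ∀ (seq : String) (cdr_regions : List (List Int)) (mut_pos : List Int), Dom_seq_to_mut seq cdr_regions mut_pos → Pre_seq_to_mut seq cdr_regions mut_pos → Spec_seq_to_mut seq cdr_regions mut_pos (seq_to_mut seq cdr_regions mut_pos)

-- ===== LEMMAS AND PROOFS =====

-- the block of characters one region contributes to A's cdr_str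
def blockOf (seq : String) (cdr : List Int) : List Char :=
  match cdr with
  | a :: b :: _ => PySem.List.slice seq.toList (some a) (some b) ++ ['_']
  | _ => []

theorem afold_eq (seq : String) (regions : List (List Int)) (acc : List Char) :
    regions.foldl (aBlockStep seq) acc = acc ++ regions.flatMap (blockOf seq) := by
  induction regions generalizing acc with
  | nil => simp
  | cons cdr rest ih =>
    match cdr with
    | a :: b :: _ => simp [aBlockStep, blockOf, ih]
    | [] => simp [aBlockStep, blockOf, ih]
    | [a] => simp [aBlockStep, blockOf, ih]

theorem charfold (mut_pos : List Int) (cs : List Char) (s : Int) (acc : List Char) :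
    cs.foldl (bChar mut_pos) (s, acc) =
    (s + cs.length,
     (PySem.List.enumerate cs s).foldl (aPick mut_pos) acc) := by
  induction cs generalizing s acc with
  | nil => simp [PySem.List.enumerate_nil]
  | cons c cs ih =>
    simp only [List.foldl_cons, PySem.List.enumerate_cons, bChar]
    rw [ih, Prod.mk.injEq]
    exact ⟨by simp [List.length_cons]; ring, by simp [aPick]⟩

theorem mainfold (seq : String) (mut_pos : List Int) (regions : List (List Int))
    (h : ∀ c ∈ regions, 2 ≤ c.length) (s : Int) (acc : List Char) :
    regions.foldl (bRegionStep seq mut_pos) (s, acc) =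
    (s + (regions.flatMap (blockOf seq)).length,
     (PySem.List.enumerate (regions.flatMap (blockOf seq)) s).foldl (aPick mut_pos) acc) := by
  induction regions generalizing s acc with
  | nil => simp [PySem.List.enumerate_nil]
  | cons cdr rest ih =>
    match cdr with
    | a :: b :: t =>
      have hstep : bRegionStep seq mut_pos (s, acc) (a :: b :: t)
          = (blockOf seq (a :: b :: t)).foldl (bChar mut_pos) (s, acc) := by
        simp [bRegionStep, blockOf, List.foldl_append, bChar]
      have hrest : ∀ c ∈ rest, 2 ≤ c.length := fun c hc => h c (List.mem_cons_of_mem _ hc)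
      rw [List.foldl_cons, hstep, charfold,
          List.flatMap_cons, PySem.List.enumerate_append, List.foldl_append,
          ih hrest, Prod.mk.injEq]
      exact ⟨by simp [List.length_append]; ring, rfl⟩
    | [] => exact absurd (h [] (List.mem_cons_self ..)) (by simp)
    | [a] => exact absurd (h [a] (List.mem_cons_self ..)) (by simp)

-- ===== VERDICT (by name: the statement is the Claim_ definition above) =====
theorem seq_to_mut_spec : Claim_equal_seq_to_mut := by
  intro seq regions mut_pos _hDom hPre
  unfold Spec_seq_to_mut seq_to_mut seq_to_mut_alt
  rw [afold_eq, mainfold seq mut_pos regions hPre 0 []]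
  simp
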